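-- pv_equiv track=rewrite | github.com/serkankalay/aoc-24 | advent_9.py | _free_spaces
-- ===== SOURCE A (Python) =====
-- from typing import Iterator
--
-- def _free_spaces(mapping: list[str]) -> Iterator[tuple[int, int]]:
--     """Yields index and length."""
--     free_space_start_index = -1
--     free_space_length = 0
--     for i, element in enumerate(mapping):
--         if element == ".":
--             if free_space_start_index < 0:
--                 free_space_start_index = i
--
--             free_space_length += 1
--             continue
--         else:
--             if free_space_start_index >= 0:
--                 yield free_space_start_index, free_space_length
--                 free_space_start_index = -1
--                 free_space_length = 0
-- ===== SOURCE B (Python) =====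
-- def _free_spaces(mapping):
--     """Yields index and length."""
--     boundaries = [i for i, element in enumerate(mapping) if element != "."]
--     for lo, hi in zip([-1] + boundaries, boundaries):
--         gap = hi - lo - 1
--         if gap > 0:
--             yield lo + 1, gap
-- ===== Notes on version B (the rewrite author's own statement) =====
-- stated objective: alternative
-- what changed: B is staged: a first pass materialises the list of non-dot indices, then a pairwise zip over that list (shifted against itself with a -1 sentinel) computes each gap by index subtraction, replacing A's single stateful scan with run-start/run-length accumulators.
import Mathlib
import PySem

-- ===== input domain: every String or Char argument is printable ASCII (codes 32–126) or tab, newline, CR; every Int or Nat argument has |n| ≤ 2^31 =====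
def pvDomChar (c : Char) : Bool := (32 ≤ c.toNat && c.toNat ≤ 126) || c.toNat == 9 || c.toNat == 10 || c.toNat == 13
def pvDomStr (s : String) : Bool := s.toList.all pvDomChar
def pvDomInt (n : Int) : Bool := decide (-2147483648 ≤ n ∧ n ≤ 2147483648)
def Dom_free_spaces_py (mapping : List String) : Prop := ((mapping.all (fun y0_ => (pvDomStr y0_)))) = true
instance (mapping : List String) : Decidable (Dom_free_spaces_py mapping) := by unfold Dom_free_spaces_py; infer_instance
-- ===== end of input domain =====

-- B replaces A's single stateful scan by two stages (collect non-dot indices, then pairwise gap computation); same O(n) cost, different decomposition.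
-- ===== PORT A =====
def free_spaces_py_go (l : List String) (i s len : Int) : List (Int × Int) :=
  match l with
  | [] => []
  | e :: rest =>
    if e = "." then
      free_spaces_py_go rest (i + 1) (if s < 0 then i else s) (len + 1)
    else
      if s ≥ 0 then (s, len) :: free_spaces_py_go rest (i + 1) (-1) 0
      else free_spaces_py_go rest (i + 1) s len

def free_spaces_py (mapping : List String) : List (Int × Int) :=
  free_spaces_py_go mapping 0 (-1) 0

-- ===== PORT B =====
-- stage 1: the comprehension [i for i, element in enumerate(mapping) if element != "."]
def free_spaces_py_alt_bnd (l : List String) (i : Int) : List Int :=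
  match l with
  | [] => []
  | e :: rest => if e = "." then free_spaces_py_alt_bnd rest (i + 1)
                 else i :: free_spaces_py_alt_bnd rest (i + 1)

-- stage 2: the loop 'for lo, hi in zip([-1] + boundaries, boundaries): if gap > 0: yield'
def free_spaces_py_alt (mapping : List String) : List (Int × Int) :=
  let boundaries := free_spaces_py_alt_bnd mapping 0
  (List.zip ((-1) :: boundaries) boundaries).filterMap
    (fun p => if p.2 - p.1 - 1 > 0 then some (p.1 + 1, p.2 - p.1 - 1) else none)

-- ===== PRECONDITION & SPEC =====
def Spec_free_spaces_py (mapping : List String) (out : List (Int × Int)) : Prop := out = free_spaces_py_alt mapping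
instance (mapping : List String) (out : List (Int × Int)) : Decidable (Spec_free_spaces_py mapping out) := by unfold Spec_free_spaces_py; infer_instance

-- ===== CLAIM (what is proved, stated in full; the proofs are below) =====
def Claim_equal_free_spaces_py : Prop := ∀ (mapping : List String), Dom_free_spaces_py mapping → Spec_free_spaces_py mapping (free_spaces_py mapping)

-- ===== LEMMAS AND PROOFS =====

-- proof-only view of B's stage 2: gaps between consecutive boundaries, starting from prev
def pvGaps (prev : Int) (bs : List Int) : List (Int × Int) :=
  match bs with
  | [] => []
  | b :: rest =>
    if b - prev - 1 > 0 then (prev + 1, b - prev - 1) :: pvGaps b rest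
    else pvGaps b rest

lemma zip_filterMap_eq_pvGaps (bs : List Int) : ∀ (prev : Int),
    (List.zip (prev :: bs) bs).filterMap
      (fun p => if p.2 - p.1 - 1 > 0 then some (p.1 + 1, p.2 - p.1 - 1) else none) =
    pvGaps prev bs := by
  induction bs with
  | nil => intro prev; simp [pvGaps]
  | cons b rest ih =>
    intro prev
    by_cases h : b - prev - 1 > 0
    · simp only [List.zip_cons_cons, List.filterMap_cons, if_pos h, pvGaps, ih b]
    · simp only [List.zip_cons_cons, List.filterMap_cons, if_neg h, pvGaps, ih b]

lemma free_spaces_go_eq_gaps (l : List String) :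
    ∀ (i prev : Int), -1 ≤ prev → prev < i →
      free_spaces_py_go l i (if prev + 1 < i then prev + 1 else -1) (i - prev - 1) =
        pvGaps prev (free_spaces_py_alt_bnd l i) := by
  induction l with
  | nil => intro i prev _ _; simp [free_spaces_py_go, free_spaces_py_alt_bnd, pvGaps]
  | cons e rest ih =>
    intro i prev h1 h2
    by_cases hc : prev + 1 < i
    · rw [if_pos hc]
      simp only [free_spaces_py_go, free_spaces_py_alt_bnd]
      by_cases hd : e = "."
      · rw [if_pos hd, if_pos hd, if_neg (by omega : ¬ (prev + 1 : Int) < 0)]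
        have := ih (i + 1) prev h1 (by omega)
        rw [if_pos (by omega : prev + 1 < i + 1),
          show (i + 1) - prev - 1 = i - prev - 1 + 1 by ring] at this
        exact this
      · rw [if_neg hd, if_neg hd, if_pos (by omega : (prev + 1 : Int) ≥ 0)]
        simp only [pvGaps]
        rw [if_pos (by omega : i - prev - 1 > 0)]
        have := ih (i + 1) i (by omega) (by omega)
        rw [if_neg (by omega : ¬ i + 1 < i + 1),
          show (i + 1) - i - 1 = (0 : Int) by ring] at this
        exact congrArg _ this
    · have hpi : i = prev + 1 := by omega
      rw [if_neg hc]
      simp only [free_spaces_py_go, free_spaces_py_alt_bnd]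
      by_cases hd : e = "."
      · rw [if_pos hd, if_pos hd, if_pos (by norm_num : (-1 : Int) < 0)]
        have := ih (i + 1) prev h1 (by omega)
        rw [if_pos (by omega : prev + 1 < i + 1),
          show (i + 1) - prev - 1 = i - prev - 1 + 1 by ring, ← hpi] at this
        exact this
      · rw [if_neg hd, if_neg hd, if_neg (by norm_num : ¬ (-1 : Int) ≥ 0)]
        simp only [pvGaps]
        rw [if_neg (by omega : ¬ i - prev - 1 > 0)]
        have := ih (i + 1) i (by omega) (by omega)
        rw [if_neg (by omega : ¬ i + 1 < i + 1),
          show (i + 1) - i - 1 = (0 : Int) by ring] at this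
        rw [show i - prev - 1 = (0 : Int) by omega]
        exact this

-- ===== VERDICT (by name: the statement is the Claim_ definition above) =====
theorem free_spaces_py_spec : Claim_equal_free_spaces_py := by
  intro mapping _
  unfold Spec_free_spaces_py free_spaces_py free_spaces_py_alt
  rw [zip_filterMap_eq_pvGaps]
  have := free_spaces_go_eq_gaps mapping 0 (-1) (by norm_num) (by norm_num)
  norm_num at this
  exact this
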